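-- pv_equiv track=rewrite | github.com/EideticPleroma/scenariowizard | app/api/routes/scenarios.py | _generate_feature_file_content
-- ===== SOURCE A (Python) =====
-- from typing import List, Dict, Any, Optional
--
-- def _generate_feature_file_content(scenarios: List[Dict[str, Any]]) -> str:
--     """Generate Gherkin .feature file content from scenarios"""
--     lines = ['# Generated BDD Scenarios\n', '# Auto-generated by ScenarioWizard\n\n']
--
--     current_feature = None
--
--     for scenario in sorted(scenarios, key=lambda s: (s.get('feature_id', ''), s.get('test_type', ''))):
--         feature_id = scenario.get('feature_id', '')
--         test_type = scenario.get('test_type', 'unit')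
--         content = scenario.get('content', '')
--
--         # Add feature header if changed
--         if current_feature != feature_id:
--             lines.append(f'# Feature ID: {feature_id}\n')
--             lines.append(f'Feature: Generated Scenarios ({test_type})\n\n')
--             current_feature = feature_id
--
--         # Add scenario content
--         if content.strip():
--             lines.append(f'# Test Type: {test_type}\n')
--             lines.append(content.strip())
--             lines.append('\n\n')
--
--     return ''.join(lines)
-- ===== SOURCE B (Python) =====
-- def _generate_feature_file_content(scenarios):
--     """Generate Gherkin .feature file content from scenarios (group-then-render)."""
--     ordered = sorted(scenarios, key=lambda s: (s.get('feature_id', ''), s.get('test_type', '')))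
--     parts = ['# Generated BDD Scenarios\n', '# Auto-generated by ScenarioWizard\n\n']
--     remaining = ordered
--     while remaining:
--         fid = remaining[0].get('feature_id', '')
--         k = 1
--         while k < len(remaining) and remaining[k].get('feature_id', '') == fid:
--             k += 1
--         group, remaining = remaining[:k], remaining[k:]
--         parts.append(f'# Feature ID: {fid}\n')
--         parts.append(f"Feature: Generated Scenarios ({group[0].get('test_type', 'unit')})\n\n")
--         for s in group:
--             body = s.get('content', '').strip()
--             if body:
--                 parts.append(f"# Test Type: {s.get('test_type', 'unit')}\n{body}\n\n")
--     return ''.join(parts)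
-- ===== Notes on version B (the rewrite author's own statement) =====
-- stated objective: idiomatic
-- what changed: A walks the sorted scenarios once with a mutable current_feature sentinel deciding when to emit headers; B splits the sorted list into contiguous feature_id runs and renders each group (header from the group's first scenario, then its members) in a separate pass.
import Mathlib
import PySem

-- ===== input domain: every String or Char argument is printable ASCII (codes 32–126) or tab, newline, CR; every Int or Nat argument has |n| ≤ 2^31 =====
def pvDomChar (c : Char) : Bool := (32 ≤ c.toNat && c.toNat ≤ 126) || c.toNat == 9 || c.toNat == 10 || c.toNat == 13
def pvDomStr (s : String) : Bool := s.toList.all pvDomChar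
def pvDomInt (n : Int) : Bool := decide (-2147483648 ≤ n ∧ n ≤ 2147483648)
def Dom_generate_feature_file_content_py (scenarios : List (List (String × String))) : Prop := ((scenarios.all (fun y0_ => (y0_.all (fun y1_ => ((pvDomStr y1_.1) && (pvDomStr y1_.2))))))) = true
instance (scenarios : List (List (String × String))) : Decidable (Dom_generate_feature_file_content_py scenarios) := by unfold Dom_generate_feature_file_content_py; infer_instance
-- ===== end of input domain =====

-- B replaces A's single pass with a mutable 'current feature' sentinel by a group-then-render
-- decomposition (split the sorted list into contiguous feature_id runs, render each run); objective: idiomatic.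

-- shared primitive: Python's dict.get(k, dflt) on an association list (first match)
def pvGet (d : List (String × String)) (k dflt : String) : String :=
  match d.find? (fun p => p.1 == k) with
  | some p => p.2
  | none => dflt

-- ===== PORT A =====
def pvStepA (st : List String × Option String) (sc : List (String × String)) :
    List String × Option String :=
  let fid := pvGet sc "feature_id" ""
  let tt := pvGet sc "test_type" "unit"
  let content := pvGet sc "content" ""
  let st1 :=
    if st.2 ≠ some fid then
      (st.1 ++ ["# Feature ID: " ++ fid ++ "\n",
                "Feature: Generated Scenarios (" ++ tt ++ ")\n\n"], some fid)
    else st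
  if PySem.Str.strip content ≠ "" then
    (st1.1 ++ ["# Test Type: " ++ tt ++ "\n", PySem.Str.strip content, "\n\n"], st1.2)
  else st1

def generate_feature_file_content_py (scenarios : List (List (String × String))) : String :=
  let ordered := PySem.List.sorted2 scenarios
    (fun s => pvGet s "feature_id" "") (fun s => pvGet s "test_type" "")
  PySem.Str.join ""
    ((ordered.foldl pvStepA
      (["# Generated BDD Scenarios\n", "# Auto-generated by ScenarioWizard\n\n"], none)).1)

-- ===== PORT B =====
-- the inner while loop of Source B: split off the leading run of scenarios whose feature_id equals fid
def pvRun (fid : String) : List (List (String × String)) →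
    List (List (String × String)) × List (List (String × String))
  | [] => ([], [])
  | sc :: rest =>
    if pvGet sc "feature_id" "" = fid then
      (sc :: (pvRun fid rest).1, (pvRun fid rest).2)
    else ([], sc :: rest)

lemma pvRun_snd_length_le (fid : String) (l : List (List (String × String))) :
    (pvRun fid l).2.length ≤ l.length := by
  induction l with
  | nil => simp [pvRun]
  | cons sc rest ih =>
    simp only [pvRun]
    split
    · exact Nat.le_succ_of_le ih
    · simp

-- the inner for loop body of Source B: the part a single scenario contributes
def pvScenarioPart (sc : List (String × String)) : List String :=
  let body := PySem.Str.strip (pvGet sc "content" "")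
  if body ≠ "" then
    ["# Test Type: " ++ pvGet sc "test_type" "unit" ++ "\n" ++ body ++ "\n\n"]
  else []

-- the outer while loop of Source B: one iteration per contiguous feature_id group
def pvEmitGroups : List (List (String × String)) → List String
  | [] => []
  | sc :: rest =>
    ("# Feature ID: " ++ pvGet sc "feature_id" "" ++ "\n") ::
    ("Feature: Generated Scenarios (" ++ pvGet sc "test_type" "unit" ++ ")\n\n") ::
    ((sc :: (pvRun (pvGet sc "feature_id" "") rest).1).flatMap pvScenarioPart ++
      pvEmitGroups (pvRun (pvGet sc "feature_id" "") rest).2)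
  termination_by l => l.length
  decreasing_by
    exact Nat.lt_succ_of_le (pvRun_snd_length_le _ _)

def generate_feature_file_content_py_alt (scenarios : List (List (String × String))) : String :=
  let ordered := PySem.List.sorted2 scenarios
    (fun s => pvGet s "feature_id" "") (fun s => pvGet s "test_type" "")
  PySem.Str.join ""
    (["# Generated BDD Scenarios\n", "# Auto-generated by ScenarioWizard\n\n"] ++
      pvEmitGroups ordered)

-- ===== PRECONDITION & SPEC =====
def Spec_generate_feature_file_content_py (scenarios : List (List (String × String))) (out : String) : Prop := out = generate_feature_file_content_py_alt scenarios
instance (scenarios : List (List (String × String))) (out : String) : Decidable (Spec_generate_feature_file_content_py scenarios out) := by unfold Spec_generate_feature_file_content_py; infer_instance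

-- ===== CLAIM (what is proved, stated in full; the proofs are below) =====
def Claim_equal_generate_feature_file_content_py : Prop := ∀ (scenarios : List (List (String × String))), Dom_generate_feature_file_content_py scenarios → Spec_generate_feature_file_content_py scenarios (generate_feature_file_content_py scenarios)

-- ===== LEMMAS AND PROOFS =====

lemma pvJoin_eq_flatten (xs : List String) :
    PySem.Str.join "" xs = String.ofList (xs.map String.toList).flatten := by
  have h : ∀ (cs : List (List Char)), PySem.Chars.join [] cs = cs.flatten := by
    intro cs
    induction cs with
    | nil => rfl
    | cons a t ih => cases t <;> simp_all [PySem.Chars.join, List.intercalate, List.intersperse]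
  simp [PySem.Str.join, h]

lemma pvJoin_nil : PySem.Str.join "" [] = "" := by
  simp [pvJoin_eq_flatten]

lemma pvJoin_cons (x : String) (xs : List String) :
    PySem.Str.join "" (x :: xs) = x ++ PySem.Str.join "" xs := by
  simp [pvJoin_eq_flatten, String.ofList_append]

lemma pvJoin_append (xs ys : List String) :
    PySem.Str.join "" (xs ++ ys) = PySem.Str.join "" xs ++ PySem.Str.join "" ys := by
  simp [pvJoin_eq_flatten, String.ofList_append]

-- A's output on the tail of the sorted list, given the current_feature sentinel
def pvRenderA : Option String → List (List (String × String)) → String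
  | _, [] => ""
  | cur, sc :: rest =>
    (if cur = some (pvGet sc "feature_id" "") then "" else
      "# Feature ID: " ++ pvGet sc "feature_id" "" ++ "\n" ++
      ("Feature: Generated Scenarios (" ++ pvGet sc "test_type" "unit" ++ ")\n\n")) ++
    (if PySem.Str.strip (pvGet sc "content" "") ≠ "" then
      "# Test Type: " ++ pvGet sc "test_type" "unit" ++ "\n" ++
        PySem.Str.strip (pvGet sc "content" "") ++ "\n\n"
     else "") ++
    pvRenderA (some (pvGet sc "feature_id" "")) rest

lemma pvFoldA (l : List (List (String × String))) :
    ∀ (lines : List String) (cur : Option String),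
    PySem.Str.join "" ((l.foldl pvStepA (lines, cur)).1) =
      PySem.Str.join "" lines ++ pvRenderA cur l := by
  induction l with
  | nil => intro lines cur; simp [pvRenderA]
  | cons sc rest ih =>
    intro lines cur
    simp only [List.foldl_cons, pvRenderA, pvStepA]
    by_cases h1 : cur = some (pvGet sc "feature_id" "") <;>
      by_cases h2 : PySem.Str.strip (pvGet sc "content" "") = "" <;>
        simp [h1, h2, ih, pvJoin_append, pvJoin_cons, pvJoin_nil, String.append_assoc]

lemma pvRenderA_some (n : Nat) :
    ∀ (l : List (List (String × String))), l.length ≤ n → ∀ (fid : String),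
    pvRenderA (some fid) l =
      PySem.Str.join "" ((pvRun fid l).1.flatMap pvScenarioPart) ++
      PySem.Str.join "" (pvEmitGroups (pvRun fid l).2) := by
  induction n with
  | zero =>
    intro l hl fid
    have : l = [] := List.length_eq_zero_iff.mp (Nat.le_zero.mp hl)
    subst this
    simp [pvRenderA, pvRun, pvEmitGroups, pvJoin_nil]
  | succ n ih =>
    intro l hl fid
    cases l with
    | nil => simp [pvRenderA, pvRun, pvEmitGroups, pvJoin_nil]
    | cons sc rest =>
      have hrest : rest.length ≤ n := Nat.le_of_succ_le_succ hl
      by_cases hfid : pvGet sc "feature_id" "" = fid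
      · -- head continues the current run
        simp only [pvRenderA, pvRun, hfid]
        rw [ih rest hrest fid]
        by_cases h2 : PySem.Str.strip (pvGet sc "content" "") = "" <;>
          simp [h2, pvScenarioPart, pvJoin_cons, String.append_assoc]
      · -- head starts a new run
        have hrun : pvRun fid (sc :: rest) = ([], sc :: rest) := by
          simp [pvRun, hfid]
        rw [hrun]
        simp only [pvRenderA, pvEmitGroups, List.flatMap_nil, pvJoin_nil]
        rw [ih rest hrest (pvGet sc "feature_id" "")]
        have hne : ¬ (some fid = some (pvGet sc "feature_id" "")) := by
          simp; intro h; exact hfid h.symm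
        by_cases h2 : PySem.Str.strip (pvGet sc "content" "") = "" <;>
          simp [hne, h2, pvScenarioPart, pvJoin_append, pvJoin_cons, String.append_assoc]

lemma pvRenderA_none (l : List (List (String × String))) :
    pvRenderA none l = PySem.Str.join "" (pvEmitGroups l) := by
  cases l with
  | nil => simp [pvRenderA, pvEmitGroups, pvJoin_nil]
  | cons sc rest =>
    simp only [pvRenderA, pvEmitGroups]
    rw [pvRenderA_some rest.length rest le_rfl (pvGet sc "feature_id" "")]
    by_cases h2 : PySem.Str.strip (pvGet sc "content" "") = "" <;>
      simp [h2, pvScenarioPart, pvJoin_append, pvJoin_cons, String.append_assoc]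

-- ===== VERDICT (by name: the statement is the Claim_ definition above) =====
theorem generate_feature_file_content_py_spec : Claim_equal_generate_feature_file_content_py := by
  intro scenarios _
  unfold Spec_generate_feature_file_content_py
  unfold generate_feature_file_content_py generate_feature_file_content_py_alt
  simp only [pvFoldA, pvJoin_append, pvRenderA_none]
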